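-- pv_equiv track=rewrite | github.com/thierryxc/dayu-agent | dayu/fins/downloaders/sec_downloader.py | _select_primary_from_index_items
-- ===== SOURCE A (Python) =====
-- from typing import Any, AsyncIterator, Awaitable, BinaryIO, Callable, Literal, Optional, TypeVar, cast, overload
--
-- def _select_primary_from_index_items(items: list[dict[str, Any]], form_type: str) -> str:
--     """从 index.json 条目中选择主文件名。
--
--     Args:
--         items: index.json 的 item 列表。
--         form_type: 表单类型。
--
--     Returns:
--         主文件名；无法判断时返回空字符串。
--
--     Raises:
--         无。
--     """
--
--     normalized_form = str(form_type).strip().upper()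
--     for item in items:
--         if not isinstance(item, dict):
--             continue
--         item_type = str(item.get("type", "")).strip().upper()
--         name = str(item.get("name", "")).strip()
--         if item_type == normalized_form and name:
--             return name
--     candidates: list[str] = []
--     for item in items:
--         if not isinstance(item, dict):
--             continue
--         name = str(item.get("name", "")).strip()
--         if not name:
--             continue
--         lower = name.lower()
--         if lower.endswith((".htm", ".html", ".txt")):
--             candidates.append(name)
--     if not candidates:
--         for item in items:
--             if not isinstance(item, dict):
--                 continue
--             name = str(item.get("name", "")).strip()
--             if name:
--                 candidates.append(name)
--     return candidates[0] if candidates else ""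
-- ===== SOURCE B (Python) =====
-- def _select_primary_from_index_items(items: list, form_type: str) -> str:
--     """Single tier-tracking pass instead of three separate scans."""
--     normalized_form = str(form_type).strip().upper()
--     ext_candidate = None
--     any_candidate = None
--     for item in items:
--         if not isinstance(item, dict):
--             continue
--         name = str(item.get("name", "")).strip()
--         item_type = str(item.get("type", "")).strip().upper()
--         if item_type == normalized_form and name:
--             return name
--         if name:
--             if any_candidate is None:
--                 any_candidate = name
--             if ext_candidate is None and name.lower().endswith((".htm", ".html", ".txt")):
--                 ext_candidate = name
--     if ext_candidate is not None:
--         return ext_candidate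
--     if any_candidate is not None:
--         return any_candidate
--     return ""
-- ===== Notes on version B (the rewrite author's own statement) =====
-- stated objective: alternative
-- what changed: Replaces A's three separate scans over items (exact-type pass, extension-candidate pass, any-name pass) by one tier-tracking pass that returns immediately on an exact type match and otherwise remembers the first extension-ending and first non-empty names.
import Mathlib
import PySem

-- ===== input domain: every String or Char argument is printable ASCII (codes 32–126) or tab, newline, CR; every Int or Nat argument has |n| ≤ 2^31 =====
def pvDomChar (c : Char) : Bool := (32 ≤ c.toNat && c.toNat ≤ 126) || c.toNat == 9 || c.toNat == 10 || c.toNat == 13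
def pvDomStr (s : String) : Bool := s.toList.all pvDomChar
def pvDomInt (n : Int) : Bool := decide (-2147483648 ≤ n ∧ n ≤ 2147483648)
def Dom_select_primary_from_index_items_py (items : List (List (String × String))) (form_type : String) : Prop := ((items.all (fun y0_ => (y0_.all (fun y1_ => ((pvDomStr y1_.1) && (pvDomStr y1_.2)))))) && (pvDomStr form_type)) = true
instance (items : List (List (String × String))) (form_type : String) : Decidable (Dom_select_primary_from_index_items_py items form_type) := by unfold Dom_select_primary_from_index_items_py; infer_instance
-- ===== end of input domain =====

-- B collapses A's three scans over items into one tier-tracking pass (alternative decomposition, same cost).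

-- ===== PORT A =====
-- shared item accessors (str(item.get(...)) with .strip()/.upper())
def pvItemName (it : List (String × String)) : String :=
  PySem.Str.strip (PySem.Dict.getD ⟨it⟩ "name" "")

def pvItemType (it : List (String × String)) : String :=
  PySem.Str.upper (PySem.Str.strip (PySem.Dict.getD ⟨it⟩ "type" ""))

-- name.lower().endswith((".htm", ".html", ".txt"))
def pvExtHit (name : String) : Bool :=
  let lower := PySem.Str.lower name
  PySem.Str.endswith lower ".htm" || PySem.Str.endswith lower ".html" || PySem.Str.endswith lower ".txt"

-- A's first loop: return name on exact type match
def aLoop1 (nf : String) : List (List (String × String)) → Option String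
  | [] => none
  | it :: rest =>
    let item_type := pvItemType it
    let name := pvItemName it
    if item_type == nf && name != "" then some name else aLoop1 nf rest

-- A's second loop: collect extension-ending candidates
def aExtCands : List (List (String × String)) → List String
  | [] => []
  | it :: rest =>
    let name := pvItemName it
    if name != "" && pvExtHit name then name :: aExtCands rest else aExtCands rest

-- A's third loop: collect all non-empty names
def aAllCands : List (List (String × String)) → List String
  | [] => []
  | it :: rest =>
    let name := pvItemName it
    if name != "" then name :: aAllCands rest else aAllCands rest

def select_primary_from_index_items_py (items : List (List (String × String))) (form_type : String) : String :=
  let normalized_form := PySem.Str.upper (PySem.Str.strip form_type)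
  match aLoop1 normalized_form items with
  | some n => n
  | none =>
    let candidates := aExtCands items
    let candidates := if candidates.isEmpty then aAllCands items else candidates
    match candidates with
    | [] => ""
    | n :: _ => n

-- ===== PORT B =====
-- B's single loop, carrying (ext_candidate, any_candidate)
def bLoop (nf : String) (ec ac : Option String) : List (List (String × String)) → String
  | [] =>
    match ec with
    | some e => e
    | none =>
      match ac with
      | some a => a
      | none => ""
  | it :: rest =>
    let name := pvItemName it
    let item_type := pvItemType it
    if item_type == nf && name != "" then name
    else
      let ac' := if name != "" && ac.isNone then some name else ac
      let ec' := if name != "" && ec.isNone && pvExtHit name then some name else ec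
      bLoop nf ec' ac' rest

def select_primary_from_index_items_py_alt (items : List (List (String × String))) (form_type : String) : String :=
  let normalized_form := PySem.Str.upper (PySem.Str.strip form_type)
  bLoop normalized_form none none items

-- ===== PRECONDITION & SPEC =====
def Spec_select_primary_from_index_items_py (items : List (List (String × String))) (form_type : String) (out : String) : Prop := out = select_primary_from_index_items_py_alt items form_type
instance (items : List (List (String × String))) (form_type : String) (out : String) : Decidable (Spec_select_primary_from_index_items_py items form_type out) := by unfold Spec_select_primary_from_index_items_py; infer_instance

-- ===== CLAIM (what is proved, stated in full; the proofs are below) =====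
def Claim_equal_select_primary_from_index_items_py : Prop := ∀ (items : List (List (String × String))) (form_type : String), Dom_select_primary_from_index_items_py items form_type → Spec_select_primary_from_index_items_py items form_type (select_primary_from_index_items_py items form_type)

-- ===== LEMMAS AND PROOFS =====
-- B's loop, with arbitrary accumulators, computes A's tiered result.
theorem bLoop_eq (nf : String) (items : List (List (String × String))) (ec ac : Option String) :
    bLoop nf ec ac items =
      (match aLoop1 nf items with
       | some n => n
       | none =>
         match ec with
         | some e => e
         | none =>
           match aExtCands items with
           | n :: _ => n
           | [] =>
             match ac with
             | some a => a
             | none =>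
               match aAllCands items with
               | n :: _ => n
               | [] => "") := by
  induction items generalizing ec ac with
  | nil => cases ec <;> cases ac <;> simp [bLoop, aLoop1, aExtCands, aAllCands]
  | cons it rest ih =>
    simp only [bLoop, aLoop1, aExtCands, aAllCands]
    by_cases hmatch : (pvItemType it == nf && pvItemName it != "") = true
    · simp [hmatch]
    · simp only [hmatch, if_false, Bool.false_eq_true]
      rw [ih]
      by_cases hn : (pvItemName it != "") = true
      · by_cases he : pvExtHit (pvItemName it) = true
        · cases ec <;> cases ac <;> simp [hn, he, Option.isNone]
        · cases ec <;> cases ac <;> cases aExtCands rest <;>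
            simp [hn, he, Option.isNone]
      · simp [hn]

theorem select_primary_from_index_items_py_spec : Claim_equal_select_primary_from_index_items_py := by
  intro items form_type _
  unfold Spec_select_primary_from_index_items_py
  unfold select_primary_from_index_items_py select_primary_from_index_items_py_alt
  rw [bLoop_eq]
  cases h1 : aLoop1 (PySem.Str.upper (PySem.Str.strip form_type)) items <;> simp only [h1]
  cases aExtCands items
  · simp only [List.isEmpty_nil, if_true]
    cases aAllCands items <;> simp
  · simp
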